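-- pv_equiv track=rewrite | github.com/MikeKorsikov/PythonClasses | Lesson36n/HW36n/Class.py | set_minimum
-- ===== SOURCE A (Python) =====
-- def set_minimum(set_of_integers):
--     if isinstance(set_of_integers, set):
--         set_min = 0
--         for i in set_of_integers:
--             if isinstance(i, int):
--                 if i < set_min:
--                     set_min = i
--             else:
--                 return "Error: wrong input."
--         return set_min
--     return 'Error: input is not a set.'
-- ===== SOURCE B (Python) =====
-- def set_minimum(set_of_integers):
--     if not isinstance(set_of_integers, set):
--         return 'Error: input is not a set.'
--     for i in set_of_integers:
--         if not isinstance(i, int):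
--             return "Error: wrong input."
--     ordered = sorted(set_of_integers)
--     return ordered[0] if ordered and ordered[0] < 0 else 0
-- ===== Notes on version B (the rewrite author's own statement) =====
-- stated objective: alternative
-- what changed: B replaces A's single-pass running-minimum loop with a sort-then-take-head algorithm: validate, sort the elements, and return the first (smallest) element if it is negative, else 0.
import Mathlib
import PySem

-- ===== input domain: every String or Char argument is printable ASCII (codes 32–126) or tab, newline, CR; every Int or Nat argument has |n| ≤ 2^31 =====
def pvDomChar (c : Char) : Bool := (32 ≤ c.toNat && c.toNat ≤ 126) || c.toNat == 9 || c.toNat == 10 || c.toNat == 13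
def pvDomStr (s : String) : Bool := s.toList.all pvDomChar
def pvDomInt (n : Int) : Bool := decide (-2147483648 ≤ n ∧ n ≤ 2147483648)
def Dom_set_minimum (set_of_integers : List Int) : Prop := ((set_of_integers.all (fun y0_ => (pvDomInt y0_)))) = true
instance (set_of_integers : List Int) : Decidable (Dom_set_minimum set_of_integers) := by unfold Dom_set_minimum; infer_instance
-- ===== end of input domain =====

-- B replaces A's running-minimum loop with sort-then-take-head (validate, sort, return head if negative else 0); alternative decomposition, same result.
-- ===== PORT A =====
-- A: single pass keeping a running minimum floored at 0
def set_minimum (set_of_integers : List Int) : Int :=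
  set_of_integers.foldl (fun set_min i => if i < set_min then i else set_min) 0

-- ===== PORT B =====
-- B: sorted(set_of_integers); head if negative, else 0
def set_minimum_alt (set_of_integers : List Int) : Int :=
  let ordered := PySem.List.sorted set_of_integers (fun x => x) false
  match ordered with
  | [] => 0
  | x :: _ => if x < 0 then x else 0

-- ===== PRECONDITION & SPEC =====
def Spec_set_minimum (set_of_integers : List Int) (out : Int) : Prop := out = set_minimum_alt set_of_integers
instance (set_of_integers : List Int) (out : Int) : Decidable (Spec_set_minimum set_of_integers out) := by unfold Spec_set_minimum; infer_instance

-- ===== CLAIM (what is proved, stated in full; the proofs are below) =====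
def Claim_equal_set_minimum : Prop := ∀ (set_of_integers : List Int), Dom_set_minimum set_of_integers → Spec_set_minimum set_of_integers (set_minimum set_of_integers)

-- ===== LEMMAS AND PROOFS =====

-- ===== VERDICT (by name: the statement is the Claim_ definition above) =====
theorem pv_fold_min (xs : List Int) : ∀ m : Int,
    xs.foldl (fun set_min i => if i < set_min then i else set_min) m = xs.foldl min m := by
  induction xs with
  | nil => intro m; rfl
  | cons x xs ih =>
    intro m
    simp only [List.foldl]
    rw [ih]
    congr 1
    by_cases h : x < m <;> simp [min_def, h]

theorem pv_foldl_min_le (xs : List Int) : ∀ m : Int,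
    (∀ y ∈ xs, m ≤ y) → xs.foldl min m = m := by
  induction xs with
  | nil => intro m _; rfl
  | cons x xs ih =>
    intro m h
    simp only [List.foldl]
    have hx : m ≤ x := h x (by simp)
    rw [min_eq_left hx]
    exact ih m (fun y hy => h y (by simp [hy]))

theorem set_minimum_spec : Claim_equal_set_minimum := by
  intro xs _
  unfold Spec_set_minimum set_minimum set_minimum_alt
  rw [pv_fold_min]
  have hperm := PySem.List.sorted_perm xs (fun x => x) false
  rw [← hperm.foldl_eq 0]
  cases hs : PySem.List.sorted xs (fun x => x) false with
  | nil => rfl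
  | cons y t =>
    have hle : ∀ z ∈ xs, y ≤ z := PySem.List.key_head_sorted_le xs (fun x => x) hs
    have hlet : ∀ z ∈ t, y ≤ z := by
      intro z hz
      exact hle z (((PySem.List.mem_sorted xs (fun x => x) false z).mp) (by rw [hs]; simp [hz]))
    simp only [List.foldl]
    by_cases h : y < 0
    · rw [min_eq_right (le_of_lt h), pv_foldl_min_le t y hlet]
      simp [h]
    · rw [min_eq_left (by omega), pv_foldl_min_le t 0 (fun z hz => le_trans (by omega : (0:Int) ≤ y) (hlet z hz))]
      simp [h]
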